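-- pv_equiv track=rewrite | github.com/julenka/euler | utils/euler.py | digits_to_num
-- ===== SOURCE A (Python) =====
-- def digits_to_num(lst):
--     result = 0
--     tens = 0
--     for i in range(len(lst)):
--         d = lst[i]
--         result += d * pow(10, tens)
--         tens += 1
--     return result
-- ===== SOURCE B (Python) =====
-- def digits_to_num(lst):
--     result = 0
--     for d in reversed(lst):
--         result = result * 10 + d
--     return result
-- ===== Notes on version B (the rewrite author's own statement) =====
-- stated objective: idiomatic
-- what changed: Replaces the index loop that recomputes pow(10, tens) for every position by Horner's method: one accumulator multiplied by 10 while iterating the digits in reverse (most-significant first), avoiding the ever-larger power computation per digit.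
import Mathlib
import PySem

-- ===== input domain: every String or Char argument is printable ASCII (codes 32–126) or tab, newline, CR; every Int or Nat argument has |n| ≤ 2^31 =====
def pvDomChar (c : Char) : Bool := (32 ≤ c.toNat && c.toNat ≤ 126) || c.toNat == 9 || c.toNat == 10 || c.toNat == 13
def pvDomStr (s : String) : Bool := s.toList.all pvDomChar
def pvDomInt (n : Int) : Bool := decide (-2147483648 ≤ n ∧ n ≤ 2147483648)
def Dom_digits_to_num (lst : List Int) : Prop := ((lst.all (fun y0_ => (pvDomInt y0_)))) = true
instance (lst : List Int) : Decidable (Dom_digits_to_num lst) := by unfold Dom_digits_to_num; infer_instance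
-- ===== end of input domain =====

-- B rewrites the per-position pow(10, tens) summation as Horner's method over the reversed list (idiomatic, single accumulator).

-- ===== PORT A =====
-- loop over i in range(len(lst)); state (result, tens); lst[i] is always in range, ported with pyGetD (default never used)
def digits_to_num (lst : List Int) : Int :=
  ((PySem.List.pyRange 0 lst.length 1).foldl
    (fun (st : Int × Int) i =>
      (st.1 + PySem.List.pyGetD lst i 0 * 10 ^ st.2.toNat, st.2 + 1)) (0, 0)).1

-- ===== PORT B =====
def digits_to_num_alt (lst : List Int) : Int :=
  lst.reverse.foldl (fun result d => result * 10 + d) 0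

-- ===== PRECONDITION & SPEC =====
def Spec_digits_to_num (lst : List Int) (out : Int) : Prop := out = digits_to_num_alt lst
instance (lst : List Int) (out : Int) : Decidable (Spec_digits_to_num lst out) := by unfold Spec_digits_to_num; infer_instance

-- ===== CLAIM (what is proved, stated in full; the proofs are below) =====
def Claim_equal_digits_to_num : Prop := ∀ (lst : List Int), Dom_digits_to_num lst → Spec_digits_to_num lst (digits_to_num lst)

-- ===== LEMMAS AND PROOFS =====

-- little-endian value, structural reference form
def pvHorner (lst : List Int) : Int :=
  match lst with
  | [] => 0
  | d :: t => d + 10 * pvHorner t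

theorem pvA_foldl (lst : List Int) (r : Int) (t : Int) (ht : 0 ≤ t) :
    (lst.foldl (fun (st : Int × Int) d => (st.1 + d * 10 ^ st.2.toNat, st.2 + 1)) (r, t)).1
      = r + 10 ^ t.toNat * pvHorner lst := by
  induction lst generalizing r t with
  | nil => simp [pvHorner]
  | cons d tl ih =>
      simp only [List.foldl, pvHorner]
      rw [ih (r + d * 10 ^ t.toNat) (t + 1) (by omega)]
      have : (t + 1).toNat = t.toNat + 1 := by omega
      rw [this]
      ring

theorem pvB_foldr (lst : List Int) :
    lst.foldr (fun d result => result * 10 + d) 0 = pvHorner lst := by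
  induction lst with
  | nil => rfl
  | cons d tl ih => simp [pvHorner, ih]; ring

-- ===== VERDICT (by name: the statement is the Claim_ definition above) =====
theorem digits_to_num_spec : Claim_equal_digits_to_num := by
  intro lst _
  show digits_to_num lst = digits_to_num_alt lst
  unfold digits_to_num digits_to_num_alt
  rw [PySem.List.foldl_pyRange_zero_pyGetD' lst 0
        (fun (st : Int × Int) d => (st.1 + d * 10 ^ st.2.toNat, st.2 + 1)) (0, 0)]
  rw [List.foldl_reverse]
  rw [pvA_foldl lst 0 0 le_rfl, pvB_foldr]
  simp
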